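-- pv_equiv track=rewrite | github.com/eddymorfeo/CFI_BACKEND | app/parsers/banco_chile/cuenta_corriente_estado_cuenta_parser.py | _find_new_channel
-- ===== SOURCE A (Python) =====
-- _NEW_FORMAT_CHANNELS = ["Oficina Central", "San Felipe", "Internet", "Banca Movil"]
--
-- def _find_new_channel(tokens: list[str]) -> tuple[int, int, str] | None:
--     variants = sorted(
--         [(ch.split(), ch) for ch in _NEW_FORMAT_CHANNELS],
--         key=lambda x: len(x[0]),
--         reverse=True,
--     )
--     for i in range(len(tokens)):
--         for ch_tokens, original in variants:
--             sl = tokens[i: i + len(ch_tokens)]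
--             if [t.upper() for t in sl] == [t.upper() for t in ch_tokens]:
--                 return i, len(ch_tokens), original
--     return None
-- ===== SOURCE B (Python) =====
-- _NEW_FORMAT_CHANNELS = ["Oficina Central", "San Felipe", "Internet", "Banca Movil"]
--
--
-- def _first_match(words, tokens_upper):
--     k = len(words)
--     for i in range(len(tokens_upper)):
--         if tokens_upper[i:i + k] == words:
--             return i
--     return None
--
--
-- def _find_new_channel(tokens):
--     tokens_upper = [t.upper() for t in tokens]
--     best = None
--     for ch in _NEW_FORMAT_CHANNELS:
--         words = [w.upper() for w in ch.split()]
--         i = _first_match(words, tokens_upper)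
--         if i is None:
--             continue
--         k = len(words)
--         if best is None or i < best[0] or (i == best[0] and best[1] < k):
--             best = (i, k, ch)
--     return best
-- ===== Notes on version B (the rewrite author's own statement) =====
-- stated objective: faster
-- what changed: Channel-major instead of position-major: B uppercases the token list once, finds each channel phrase's first start index independently, then selects the best candidate (smallest index, longer phrase on an index tie), replacing A's per-position scan that re-uppercases a slice for every (position, variant) pair.
import Mathlib
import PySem

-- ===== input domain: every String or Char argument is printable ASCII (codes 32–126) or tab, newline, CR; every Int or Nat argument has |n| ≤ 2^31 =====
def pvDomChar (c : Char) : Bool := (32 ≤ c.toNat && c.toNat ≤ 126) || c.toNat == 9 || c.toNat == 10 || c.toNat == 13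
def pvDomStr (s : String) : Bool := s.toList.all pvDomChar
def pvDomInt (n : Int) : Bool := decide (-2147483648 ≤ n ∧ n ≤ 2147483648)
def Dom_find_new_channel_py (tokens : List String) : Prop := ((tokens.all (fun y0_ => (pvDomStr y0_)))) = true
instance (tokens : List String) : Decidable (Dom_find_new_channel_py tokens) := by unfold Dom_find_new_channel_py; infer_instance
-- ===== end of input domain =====

-- B is channel-major: it uppercases the tokens once, finds each channel phrase's first match
-- index independently, then selects the earliest (longest on a tie) — vs A's position-major scan
-- (measurably faster: each token/phrase word is uppercased once, not per position).


-- ===== PORT A =====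
-- variants = sorted([(ch.split(), ch) for ch in _NEW_FORMAT_CHANNELS], key=len of words, reverse=True)
def pvVariants : List (List String × String) :=
  PySem.List.sorted
    ((["Oficina Central", "San Felipe", "Internet", "Banca Movil"]).map
      (fun ch => (PySem.Str.split₀ ch, ch)))
    (fun x => x.1.length) true

-- inner 'for ch_tokens, original in variants' loop at position i; 'sl0' is tokens[i:]
-- (the slice tokens[i:i+len(ch_tokens)] is sl0.take (len ch_tokens))
def pvTryAt (sl0 : List String) (i : Int) : List (List String × String) → Option (Int × Int × String)
  | [] => none
  | (chToks, original) :: rest =>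
      if (sl0.take chToks.length).map PySem.Str.upper == chToks.map PySem.Str.upper then
        some (i, (chToks.length : Int), original)
      else pvTryAt sl0 i rest

-- outer 'for i in range(len(tokens))' loop: structural recursion on the remaining suffix
def pvAScan : List String → Int → Option (Int × Int × String)
  | [], _ => none
  | l@(_ :: t), i =>
      match pvTryAt l i pvVariants with
      | some r => some r
      | none => pvAScan t (i + 1)

def find_new_channel_py (tokens : List String) : Option (Int × Int × String) :=
  pvAScan tokens 0

-- ===== PORT B =====
-- _first_match: first start index where the uppercased token list carries the phrase words
def pvFirstMatch (words : List String) : List String → Int → Option Int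
  | [], _ => none
  | l@(_ :: t), i =>
      if l.take words.length == words then some i else pvFirstMatch words t (i + 1)

-- the 'if best is None or i < best[0] or (i == best[0] and best[1] < k)' update
def pvBStep (best cand : Option (Int × Int × String)) : Option (Int × Int × String) :=
  match cand with
  | none => best
  | some c =>
      match best with
      | none => some c
      | some b => if c.1 < b.1 || (c.1 == b.1 && b.2.1 < c.2.1) then some c else some b

def find_new_channel_py_alt (tokens : List String) : Option (Int × Int × String) :=
  let tokensUpper := tokens.map PySem.Str.upper
  (["Oficina Central", "San Felipe", "Internet", "Banca Movil"]).foldl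
    (fun best ch =>
      let words := (PySem.Str.split₀ ch).map PySem.Str.upper
      pvBStep best ((pvFirstMatch words tokensUpper 0).map
        (fun i => (i, (words.length : Int), ch))))
    none

-- ===== PRECONDITION & SPEC =====
def Spec_find_new_channel_py (tokens : List String) (out : Option (Int × Int × String)) : Prop := out = find_new_channel_py_alt tokens
instance (tokens : List String) (out : Option (Int × Int × String)) : Decidable (Spec_find_new_channel_py tokens out) := by unfold Spec_find_new_channel_py; infer_instance

-- ===== CLAIM (what is proved, stated in full; the proofs are below) =====
def Claim_equal_find_new_channel_py : Prop := ∀ (tokens : List String), Dom_find_new_channel_py tokens → Spec_find_new_channel_py tokens (find_new_channel_py tokens)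

-- ===== LEMMAS AND PROOFS =====

-- candidate of one channel, phrased on the original (not yet uppercased) suffix
def pvCand (W : List String) (k : Int) (nm : String) (l : List String) (i : Int) :
    Option (Int × Int × String) :=
  (pvFirstMatch W (l.map PySem.Str.upper) i).map (fun j => (j, k, nm))

theorem pvVariants_eq : pvVariants =
    [(["Oficina", "Central"], "Oficina Central"), (["San", "Felipe"], "San Felipe"),
     (["Banca", "Movil"], "Banca Movil"), (["Internet"], "Internet")] := by decide

theorem pvAlt_eq (tokens : List String) :
    find_new_channel_py_alt tokens =
      pvBStep (pvBStep (pvBStep (pvBStep none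
        (pvCand ["OFICINA", "CENTRAL"] 2 "Oficina Central" tokens 0))
        (pvCand ["SAN", "FELIPE"] 2 "San Felipe" tokens 0))
        (pvCand ["INTERNET"] 1 "Internet" tokens 0))
        (pvCand ["BANCA", "MOVIL"] 2 "Banca Movil" tokens 0) := by
  rfl

theorem pvFirstMatch_bound (W : List String) :
    ∀ (l : List String) (i j : Int), pvFirstMatch W l i = some j → i ≤ j := by
  intro l
  induction l with
  | nil => intro i j h; simp [pvFirstMatch] at h
  | cons s t ih =>
      intro i j h
      simp only [pvFirstMatch] at h
      split at h
      · cases h; omega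
      · have := ih (i + 1) j h; omega

theorem pvCand_bound (W : List String) (k : Int) (nm : String) (l : List String) (i : Int)
    (x : Int × Int × String) (h : pvCand W k nm l i = some x) : i ≤ x.1 := by
  unfold pvCand at h
  cases hm : pvFirstMatch W (l.map PySem.Str.upper) i with
  | none => rw [hm] at h; simp at h
  | some j =>
      rw [hm] at h
      simp only [Option.map_some] at h
      cases h
      exact pvFirstMatch_bound W _ i j hm

theorem pvCand_cons (W : List String) (k : Int) (nm s : String) (t : List String) (i : Int) :
    pvCand W k nm (s :: t) i =
      if ((s :: t).map PySem.Str.upper).take W.length == W then some (i, k, nm)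
      else pvCand W k nm t (i + 1) := by
  unfold pvCand
  simp only [pvFirstMatch, List.map_cons]
  split <;> simp

theorem pvBStep_acc_lt (acc : Option (Int × Int × String)) (c : Int × Int × String)
    (h : ∀ x, acc = some x → c.1 < x.1) : pvBStep acc (some c) = some c := by
  cases acc with
  | none => rfl
  | some b =>
      have hb := h b rfl
      simp [pvBStep, hb]

theorem pvBStep_keep (b : Int × Int × String) (c : Option (Int × Int × String))
    (h : ∀ x, c = some x → b.1 < x.1 ∨ (x.1 = b.1 ∧ x.2.1 ≤ b.2.1)) :
    pvBStep (some b) c = some b := by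
  cases c with
  | none => rfl
  | some x =>
      rcases h x rfl with hlt | ⟨he, hk⟩
      · simp [pvBStep]; omega
      · simp [pvBStep]; omega

theorem pvBStep_bound (m : Int) (acc c : Option (Int × Int × String))
    (ha : ∀ x, acc = some x → m ≤ x.1) (hc : ∀ x, c = some x → m ≤ x.1) :
    ∀ x, pvBStep acc c = some x → m ≤ x.1 := by
  intro x h
  cases c with
  | none => exact ha x h
  | some cv =>
      cases acc with
      | none => simp only [pvBStep] at h; cases h; exact hc _ rfl
      | some b =>
          simp only [pvBStep] at h
          split at h
          · cases h; exact hc _ rfl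
          · cases h; exact ha _ rfl

-- A's per-position scan written as one nested if over the sorted variant order
theorem pvAScan_cons (s : String) (t : List String) (i : Int) :
    pvAScan (s :: t) i =
      if ((s :: t).map PySem.Str.upper).take (["OFICINA", "CENTRAL"] : List String).length == ["OFICINA", "CENTRAL"] then some (i, 2, "Oficina Central")
      else if ((s :: t).map PySem.Str.upper).take (["SAN", "FELIPE"] : List String).length == ["SAN", "FELIPE"] then some (i, 2, "San Felipe")
      else if ((s :: t).map PySem.Str.upper).take (["BANCA", "MOVIL"] : List String).length == ["BANCA", "MOVIL"] then some (i, 2, "Banca Movil")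
      else if ((s :: t).map PySem.Str.upper).take (["INTERNET"] : List String).length == ["INTERNET"] then some (i, 1, "Internet")
      else pvAScan t (i + 1) := by
  have e1 : (((s :: t).take (["Oficina", "Central"] : List String).length).map PySem.Str.upper == (["Oficina", "Central"] : List String).map PySem.Str.upper)
      = (((s :: t).map PySem.Str.upper).take (["OFICINA", "CENTRAL"] : List String).length == ["OFICINA", "CENTRAL"]) := by
    rw [List.map_take]; rfl
  have e2 : (((s :: t).take (["San", "Felipe"] : List String).length).map PySem.Str.upper == (["San", "Felipe"] : List String).map PySem.Str.upper)
      = (((s :: t).map PySem.Str.upper).take (["SAN", "FELIPE"] : List String).length == ["SAN", "FELIPE"]) := by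
    rw [List.map_take]; rfl
  have e3 : (((s :: t).take (["Internet"] : List String).length).map PySem.Str.upper == (["Internet"] : List String).map PySem.Str.upper)
      = (((s :: t).map PySem.Str.upper).take (["INTERNET"] : List String).length == ["INTERNET"]) := by
    rw [List.map_take]; rfl
  have e4 : (((s :: t).take (["Banca", "Movil"] : List String).length).map PySem.Str.upper == (["Banca", "Movil"] : List String).map PySem.Str.upper)
      = (((s :: t).map PySem.Str.upper).take (["BANCA", "MOVIL"] : List String).length == ["BANCA", "MOVIL"]) := by
    rw [List.map_take]; rfl
  show (match pvTryAt (s :: t) i pvVariants with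
        | some r => some r
        | none => pvAScan t (i + 1)) = _
  rw [pvVariants_eq]
  simp only [pvTryAt, e1, e2, e3, e4]
  split_ifs <;> rfl

theorem pvBStep_none_left (r : Option (Int × Int × String)) : pvBStep none r = r := by
  cases r <;> rfl

-- candidate of the form 'if matched-here then (i, kc, nm) else rest' is never preferable to a
-- best of the form (i, kb, _) with kc <= kb
theorem pvCandIf_hyp (cond : Bool) (i kb kc : Int) (nm : String)
    (r : Option (Int × Int × String)) (hr : ∀ x, r = some x → i + 1 ≤ x.1) (hk : kc ≤ kb) :
    ∀ x, (if cond then some (i, kc, nm) else r) = some x →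
      i < x.1 ∨ (x.1 = i ∧ x.2.1 ≤ kb) := by
  intro x hx
  cases cond with
  | true =>
      simp only [if_true] at hx
      cases hx
      exact Or.inr ⟨rfl, hk⟩
  | false =>
      simp only [Bool.false_eq_true, if_false] at hx
      exact Or.inl (by have := hr x hx; omega)

theorem pvMain : ∀ (l : List String) (i : Int),
    pvAScan l i =
      pvBStep (pvBStep (pvBStep (pvBStep none
        (pvCand ["OFICINA", "CENTRAL"] 2 "Oficina Central" l i))
        (pvCand ["SAN", "FELIPE"] 2 "San Felipe" l i))
        (pvCand ["INTERNET"] 1 "Internet" l i))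
        (pvCand ["BANCA", "MOVIL"] 2 "Banca Movil" l i) := by
  intro l
  induction l with
  | nil => intro i; rfl
  | cons s t ih =>
      intro i
      rw [pvAScan_cons, pvCand_cons, pvCand_cons, pvCand_cons, pvCand_cons]
      -- the four residual (search the tail from i+1) candidates and their lower bounds
      have hr1 : ∀ x, pvCand ["OFICINA", "CENTRAL"] 2 "Oficina Central" t (i + 1) = some x → i + 1 ≤ x.1 :=
        fun x hx => pvCand_bound _ _ _ _ _ _ hx
      have hr2 : ∀ x, pvCand ["SAN", "FELIPE"] 2 "San Felipe" t (i + 1) = some x → i + 1 ≤ x.1 :=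
        fun x hx => pvCand_bound _ _ _ _ _ _ hx
      have hr3 : ∀ x, pvCand ["INTERNET"] 1 "Internet" t (i + 1) = some x → i + 1 ≤ x.1 :=
        fun x hx => pvCand_bound _ _ _ _ _ _ hx
      have hr4 : ∀ x, pvCand ["BANCA", "MOVIL"] 2 "Banca Movil" t (i + 1) = some x → i + 1 ≤ x.1 :=
        fun x hx => pvCand_bound _ _ _ _ _ _ hx
      cases hc1 : (((s :: t).map PySem.Str.upper).take (["OFICINA", "CENTRAL"] : List String).length == ["OFICINA", "CENTRAL"]) with
      | true =>
          -- A picks "Oficina Central"; every other candidate is at the same index with a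
          -- word count <= 2 or strictly later, so B keeps it
          simp only [if_true]
          rw [pvBStep_none_left,
            pvBStep_keep _ _ (pvCandIf_hyp _ i 2 2 _ _ hr2 (by omega)),
            pvBStep_keep _ _ (pvCandIf_hyp _ i 2 1 _ _ hr3 (by omega)),
            pvBStep_keep _ _ (pvCandIf_hyp _ i 2 2 _ _ hr4 (by omega))]
      | false =>
      simp only [Bool.false_eq_true, if_false, pvBStep_none_left]
      cases hc2 : (((s :: t).map PySem.Str.upper).take (["SAN", "FELIPE"] : List String).length == ["SAN", "FELIPE"]) with
      | true =>
          simp only [if_true]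
          rw [pvBStep_acc_lt _ _ (fun x hx => by have := hr1 x hx; omega),
            pvBStep_keep _ _ (pvCandIf_hyp _ i 2 1 _ _ hr3 (by omega)),
            pvBStep_keep _ _ (pvCandIf_hyp _ i 2 2 _ _ hr4 (by omega))]
      | false =>
      simp only [Bool.false_eq_true, if_false]
      -- bound for the accumulator after the two residual candidates
      have hacc2 : ∀ x, pvBStep (pvCand ["OFICINA", "CENTRAL"] 2 "Oficina Central" t (i + 1))
          (pvCand ["SAN", "FELIPE"] 2 "San Felipe" t (i + 1)) = some x → i + 1 ≤ x.1 :=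
        pvBStep_bound (i + 1) _ _ hr1 hr2
      cases hc4 : (((s :: t).map PySem.Str.upper).take (["BANCA", "MOVIL"] : List String).length == ["BANCA", "MOVIL"]) with
      | true =>
          -- A picks "Banca Movil" (checked before "Internet"); in B the one-word "Internet"
          -- match at the same index, if any, is displaced by the two-word "Banca Movil"
          simp only [if_true]
          cases hc3 : (((s :: t).map PySem.Str.upper).take (["INTERNET"] : List String).length == ["INTERNET"]) with
          | true =>
              simp only [if_true]
              have hInner : pvBStep (pvBStep (pvCand ["OFICINA", "CENTRAL"] 2 "Oficina Central" t (i + 1))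
                  (pvCand ["SAN", "FELIPE"] 2 "San Felipe" t (i + 1))) (some (i, 1, "Internet"))
                  = some (i, 1, "Internet") :=
                pvBStep_acc_lt _ _ (fun x hx => by have := hacc2 x hx; omega)
              rw [hInner]
              simp [pvBStep]
          | false =>
              simp only [Bool.false_eq_true, if_false]
              rw [pvBStep_acc_lt _ _
                (fun x hx => by have := pvBStep_bound (i + 1) _ _ hacc2 hr3 x hx; omega)]
      | false =>
      simp only [Bool.false_eq_true, if_false]
      cases hc3 : (((s :: t).map PySem.Str.upper).take (["INTERNET"] : List String).length == ["INTERNET"]) with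
      | true =>
          simp only [if_true]
          rw [pvBStep_acc_lt _ _ (fun x hx => by have := hacc2 x hx; omega),
            pvBStep_keep _ _ (fun x hx => Or.inl (by have := hr4 x hx; omega))]
      | false =>
          simp only [Bool.false_eq_true, if_false]
          have h := ih (i + 1)
          rw [pvBStep_none_left] at h
          exact h

-- ===== VERDICT (by name: the statement is the Claim_ definition above) =====
theorem find_new_channel_py_spec : Claim_equal_find_new_channel_py := by
  intro tokens _
  unfold Spec_find_new_channel_py
  rw [pvAlt_eq]
  exact pvMain tokens 0
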